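-- pv_equiv track=rewrite | github.com/Unidecimal/advent-of-code | 2015/p3/main.py | result_of_delivery_robo_and_santa
-- ===== SOURCE A (Python) =====
-- def receive_coordinates(direction, x, y):
--     if direction == ">":
--         x += 1
--     if direction == "<":
--         x -= 1
--     if direction == "^":
--         y += 1
--     if direction == "v":
--         y -= 1
--     return x, y
--
-- def count_delivered_presents(houses_visited):
--     number_of_presents = 0
--     for key in houses_visited:
--         number_of_presents += houses_visited[key]
--     return number_of_presents
--
-- def result_of_delivery_robo_and_santa(route):
--     houses_visited = {"0,0": 1}
--     snt_x = 0
--     snt_y = 0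
--     rob_x = 0
--     rob_y = 0
--
--     for index, direction in enumerate(route):
--         if index % 2 == 0:
--             snt_x, snt_y = receive_coordinates(direction, snt_x, snt_y)
--             snt_house = f"{snt_x},{snt_y}"
--             check_if_house_got_a_visit(snt_house, snt_x, snt_y, houses_visited)
--         else:
--             rob_x, rob_y = receive_coordinates(direction, rob_x, rob_y)
--             rob_house = f"{rob_x},{rob_y}"
--             check_if_house_got_a_visit(rob_house, rob_x, rob_y, houses_visited)
--
--     return len(houses_visited), count_delivered_presents(houses_visited)
--
-- def check_if_house_got_a_visit(house, x, y, houses_visited):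
--     if house in houses_visited:
--         houses_visited[house] += 1
--     else:
--         houses_visited.update({house: 1})
-- ===== SOURCE B (Python) =====
-- def _walk(path, seen):
--     x = y = 0
--     for d in path:
--         if d == ">":
--             x += 1
--         elif d == "<":
--             x -= 1
--         elif d == "^":
--             y += 1
--         elif d == "v":
--             y -= 1
--         seen.add((x, y))
--
--
-- def result_of_delivery_robo_and_santa(route):
--     seen = {(0, 0)}
--     _walk(route[0::2], seen)
--     _walk(route[1::2], seen)
--     return len(seen), len(route) + 1
-- ===== Notes on version B (the rewrite author's own statement) =====
-- stated objective: simpler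
-- what changed: B drops the counting dict and the summing pass entirely: presents are the closed form len(route)+1, and unique houses are kept as a set of (x,y) tuples filled by two independent walks over the even-index (santa) and odd-index (robo) slices of the route instead of A's single interleaved loop over string-formatted dict keys.
import Mathlib
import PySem

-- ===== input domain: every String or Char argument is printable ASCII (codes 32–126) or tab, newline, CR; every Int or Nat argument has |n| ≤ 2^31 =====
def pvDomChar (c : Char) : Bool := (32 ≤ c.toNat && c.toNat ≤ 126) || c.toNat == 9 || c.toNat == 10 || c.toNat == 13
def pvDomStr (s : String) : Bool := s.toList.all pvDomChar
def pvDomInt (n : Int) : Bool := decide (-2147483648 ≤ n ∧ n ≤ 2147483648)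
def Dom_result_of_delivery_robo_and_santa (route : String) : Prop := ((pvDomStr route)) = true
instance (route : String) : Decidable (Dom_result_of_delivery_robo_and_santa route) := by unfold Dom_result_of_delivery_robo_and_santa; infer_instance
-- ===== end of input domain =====

-- B replaces A's counting dict over string keys by a set of coordinate pairs filled by two
-- independent walks (even-index santa / odd-index robo slices) and the closed form len(route)+1
-- for the presents; objective: simpler.


-- ===== PORT A =====
def receive_coordinates (direction : Char) (x y : Int) : Int × Int :=
  let x := if direction == '>' then x + 1 else x
  let x := if direction == '<' then x - 1 else x
  let y := if direction == '^' then y + 1 else y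
  let y := if direction == 'v' then y - 1 else y
  (x, y)

-- 'for key in houses_visited: number_of_presents += houses_visited[key]': every key iterated is
-- present, so 'houses_visited[key]' never raises and '(get? …).getD 0' is exact here.
def count_delivered_presents (houses_visited : PySem.Dict String Int) : Int :=
  houses_visited.keys.foldl (fun number_of_presents key => number_of_presents + (houses_visited.get? key).getD 0) 0

def check_if_house_got_a_visit (house : String) (x y : Int) (houses_visited : PySem.Dict String Int) : PySem.Dict String Int :=
  if houses_visited.contains house then
    houses_visited.insert house ((houses_visited.get? house).getD 0 + 1)
  else
    houses_visited.insert house 1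

def result_of_delivery_robo_and_santa (route : String) : Int × Int :=
  let init : PySem.Dict String Int := PySem.Dict.ofList [("0,0", 1)]
  let st := (PySem.List.enumerate route.toList 0).foldl
    (fun (st : PySem.Dict String Int × (Int × Int) × (Int × Int)) p =>
      match st, p with
      | (houses_visited, (snt_x, snt_y), (rob_x, rob_y)), (index, direction) =>
        if PySem.Int.mod index 2 == 0 then
          let (snt_x, snt_y) := receive_coordinates direction snt_x snt_y
          let snt_house := PySem.Int.toStr snt_x ++ "," ++ PySem.Int.toStr snt_y
          (check_if_house_got_a_visit snt_house snt_x snt_y houses_visited, (snt_x, snt_y), (rob_x, rob_y))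
        else
          let (rob_x, rob_y) := receive_coordinates direction rob_x rob_y
          let rob_house := PySem.Int.toStr rob_x ++ "," ++ PySem.Int.toStr rob_y
          (check_if_house_got_a_visit rob_house rob_x rob_y houses_visited, (snt_x, snt_y), (rob_x, rob_y)))
    (init, ((0 : Int), (0 : Int)), ((0 : Int), (0 : Int)))
  ((st.1.size : Int), count_delivered_presents st.1)

-- ===== PORT B =====
def pvWalk (path : List Char) (seen : PySem.Set (Int × Int)) : PySem.Set (Int × Int) :=
  (path.foldl
    (fun (st : PySem.Set (Int × Int) × Int × Int) d =>
      match st with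
      | (seen, x, y) =>
        let (x, y) : Int × Int :=
          if d == '>' then (x + 1, y)
          else if d == '<' then (x - 1, y)
          else if d == '^' then (x, y + 1)
          else if d == 'v' then (x, y - 1)
          else (x, y)
        (PySem.Set.add seen (x, y), x, y))
    (seen, 0, 0)).1

def result_of_delivery_robo_and_santa_alt (route : String) : Int × Int :=
  let seen : PySem.Set (Int × Int) := PySem.Set.ofList [((0 : Int), (0 : Int))]
  let seen := pvWalk ((PySem.List.slice? route.toList (some 0) none 2).getD []) seen
  let seen := pvWalk ((PySem.List.slice? route.toList (some 1) none 2).getD []) seen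
  ((PySem.Set.len seen : Int), (PySem.Str.len route) + 1)

-- ===== PRECONDITION & SPEC =====
def Spec_result_of_delivery_robo_and_santa (route : String) (out : Int × Int) : Prop := out = result_of_delivery_robo_and_santa_alt route
instance (route : String) (out : Int × Int) : Decidable (Spec_result_of_delivery_robo_and_santa route out) := by unfold Spec_result_of_delivery_robo_and_santa; infer_instance

-- ===== CLAIM (what is proved, stated in full; the proofs are below) =====
def Claim_equal_result_of_delivery_robo_and_santa : Prop := ∀ (route : String), Dom_result_of_delivery_robo_and_santa route → Spec_result_of_delivery_robo_and_santa route (result_of_delivery_robo_and_santa route)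

-- ===== LEMMAS AND PROOFS =====

-- shared step function (proof-side): what one direction character does to a position
def pvStep (d : Char) (p : Int × Int) : Int × Int :=
  if d == '>' then (p.1 + 1, p.2)
  else if d == '<' then (p.1 - 1, p.2)
  else if d == '^' then (p.1, p.2 + 1)
  else if d == 'v' then (p.1, p.2 - 1)
  else p

def pvKey (p : Int × Int) : String := PySem.Int.toStr p.1 ++ "," ++ PySem.Int.toStr p.2

-- positions visited by a single walker
def pvWalkPos : List Char → (Int × Int) → List (Int × Int)
  | [], _ => []
  | c :: rest, p => pvStep c p :: pvWalkPos rest (pvStep c p)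

-- positions visited by A's interleaved loop: the head char moves the first agent, then roles swap
def pvAVisits : List Char → (Int × Int) → (Int × Int) → List (Int × Int)
  | [], _, _ => []
  | c :: rest, s, r => pvStep c s :: pvAVisits rest r (pvStep c s)

-- every second element, starting at the head
def pvEvens {α : Type} : List α → List α
  | [] => []
  | [a] => [a]
  | a :: _ :: l => a :: pvEvens l

theorem pvEvens_cons {α : Type} (a : α) (l : List α) : pvEvens (a :: l) = a :: pvEvens l.tail := by
  cases l <;> rfl

theorem pv_rc_eq (d : Char) (x y : Int) : receive_coordinates d x y = pvStep d (x, y) := by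
  simp only [receive_coordinates, pvStep]
  by_cases h1 : d = '>' <;> by_cases h2 : d = '<' <;> by_cases h3 : d = '^' <;>
    by_cases h4 : d = 'v' <;> simp_all

theorem pv_check_eq (h : String) (x y : Int) (d : PySem.Dict String Int) :
    check_if_house_got_a_visit h x y d = d.modify h 0 (· + 1) := by
  simp only [check_if_house_got_a_visit, PySem.Dict.modify, PySem.Dict.getD_eq_get?_getD]
  split_ifs with hc
  · rfl
  · rw [PySem.Dict.contains_eq_isSome_get?] at hc
    simp only [Bool.not_eq_true, Option.isSome_eq_false_iff, Option.isNone_iff_eq_none] at hc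
    simp [hc]

theorem pv_foldA (l : List Char) (i : Int) (hi : 0 ≤ i) (d : PySem.Dict String Int)
    (s r : Int × Int) :
    ((PySem.List.enumerate l i).foldl
      (fun (st : PySem.Dict String Int × (Int × Int) × (Int × Int)) p =>
        match st, p with
        | (houses_visited, (snt_x, snt_y), (rob_x, rob_y)), (index, direction) =>
          if PySem.Int.mod index 2 == 0 then
            let (snt_x, snt_y) := receive_coordinates direction snt_x snt_y
            let snt_house := PySem.Int.toStr snt_x ++ "," ++ PySem.Int.toStr snt_y
            (check_if_house_got_a_visit snt_house snt_x snt_y houses_visited, (snt_x, snt_y), (rob_x, rob_y))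
          else
            let (rob_x, rob_y) := receive_coordinates direction rob_x rob_y
            let rob_house := PySem.Int.toStr rob_x ++ "," ++ PySem.Int.toStr rob_y
            (check_if_house_got_a_visit rob_house rob_x rob_y houses_visited, (snt_x, snt_y), (rob_x, rob_y)))
      (d, s, r)).1
    = (if PySem.Int.mod i 2 = 0 then pvAVisits l s r else pvAVisits l r s).foldl
        (fun d p => d.modify (pvKey p) 0 (· + 1)) d := by
  induction l generalizing i d s r with
  | nil => split_ifs <;> rfl
  | cons c rest ih =>
    obtain ⟨sx, sy⟩ := s
    obtain ⟨rx, ry⟩ := r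
    rw [PySem.List.enumerate_cons, List.foldl_cons]
    have hmod : PySem.Int.mod i 2 = i % 2 := PySem.Int.mod_eq_emod_of_pos (by omega)
    have hmod1 : PySem.Int.mod (i + 1) 2 = (i + 1) % 2 := PySem.Int.mod_eq_emod_of_pos (by omega)
    by_cases hp : PySem.Int.mod i 2 = 0
    · rcases hrc : receive_coordinates c sx sy with ⟨nx, ny⟩
      have hstep : pvStep c (sx, sy) = (nx, ny) := by rw [← pv_rc_eq, hrc]
      simp only [hp, hrc, if_pos, beq_self_eq_true, if_true]
      rw [ih (i + 1) (by omega)]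
      have hp1 : ¬ PySem.Int.mod (i + 1) 2 = 0 := by rw [hmod1]; rw [hmod] at hp; omega
      rw [if_neg hp1]
      simp only [pvAVisits, hstep, List.foldl_cons, pv_check_eq]
      rfl
    · rcases hrc : receive_coordinates c rx ry with ⟨nx, ny⟩
      have hstep : pvStep c (rx, ry) = (nx, ny) := by rw [← pv_rc_eq, hrc]
      have hbe : (PySem.Int.mod i 2 == 0) = false := by simpa using hp
      simp only [hbe, hrc, Bool.false_eq_true, if_false]
      rw [ih (i + 1) (by omega)]
      have hp1 : PySem.Int.mod (i + 1) 2 = 0 := by rw [hmod1]; rw [hmod] at hp; omega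
      rw [if_pos hp1, if_neg hp]
      simp only [pvAVisits, hstep, List.foldl_cons, pv_check_eq]
      rfl

theorem pv_dictA (route : String) :
    (result_of_delivery_robo_and_santa route)
    = (((PySem.Dict.counter ("0,0" :: (pvAVisits route.toList (0, 0) (0, 0)).map pvKey)).size : Int),
       count_delivered_presents (PySem.Dict.counter ("0,0" :: (pvAVisits route.toList (0, 0) (0, 0)).map pvKey))) := by
  simp only [result_of_delivery_robo_and_santa]
  rw [pv_foldA route.toList 0 (le_refl 0)]
  rw [if_pos (by decide : PySem.Int.mod 0 2 = 0)]
  rw [PySem.Dict.counter_eq_foldl, List.foldl_cons, List.foldl_map]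
  have hbase : (PySem.Dict.ofList [(("0,0" : String), (1 : Int))])
      = PySem.Dict.empty.modify "0,0" 0 (· + 1) := by decide
  rw [← hbase]

theorem pv_presents (xs : List String) :
    count_delivered_presents (PySem.Dict.counter xs) = (xs.length : Int) := by
  simp only [count_delivered_presents, PySem.Dict.keys_counter, PySem.List.foldl_add, zero_add]
  have h1 : (PySem.Set.ofList xs).map (fun key => ((PySem.Dict.counter xs).get? key).getD 0)
      = (PySem.Set.ofList xs).map (fun key => ((xs.count key : Nat) : Int)) := by
    refine List.map_congr_left fun k _ => ?_
    rw [← PySem.Dict.getD_eq_get?_getD, PySem.Dict.getD_counter]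
  rw [h1]
  have h2 : ((PySem.Set.ofList xs).map (fun key => ((xs.count key : Nat) : Int)))
      = ((PySem.Set.ofList xs).map (fun key => xs.count key)).map (Nat.cast : Nat → Int) := by
    rw [List.map_map]; rfl
  rw [h2, ← Nat.cast_list_sum]
  have hperm : (PySem.Set.ofList xs).Perm xs.dedup := by
    rw [List.perm_ext_iff_of_nodup (PySem.Set.nodup_ofList xs) xs.nodup_dedup]
    intro a
    rw [PySem.Set.mem_ofList, List.mem_dedup]
  have h3 : ((PySem.Set.ofList xs).map (fun key => xs.count key)).sum
      = (xs.dedup.map (fun key => xs.count key)).sum := (hperm.map _).sum_eq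
  rw [h3]
  rw [show (xs.dedup.map fun key => xs.count key) = (xs.dedup.map fun x => xs.count x) from rfl]
  rw [List.sum_map_count_dedup_eq_length]

theorem pv_size_counter (xs : List String) :
    ((PySem.Dict.counter xs).size : Int) = ((PySem.Set.ofList xs).length : Int) := by
  simp [PySem.Dict.size, PySem.Dict.items_counter]

theorem pv_len_aVisits (l : List Char) (s r : Int × Int) : (pvAVisits l s r).length = l.length := by
  induction l generalizing s r with
  | nil => rfl
  | cons c rest ih => simp [pvAVisits, ih]

theorem pv_perm (l : List Char) (s r : Int × Int) :
    (pvAVisits l s r).Perm (pvWalkPos (pvEvens l) s ++ pvWalkPos (pvEvens l.tail) r) := by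
  induction l generalizing s r with
  | nil => simp [pvAVisits, pvEvens, pvWalkPos]
  | cons c rest ih =>
    rw [pvEvens_cons]
    simp only [pvAVisits, pvWalkPos, List.tail_cons, List.cons_append]
    exact List.Perm.cons _ ((ih r (pvStep c s)).trans List.perm_append_comm)

theorem pv_walk_aux (path : List Char) (s : PySem.Set (Int × Int)) (x y : Int) :
    (path.foldl
      (fun (st : PySem.Set (Int × Int) × Int × Int) d =>
        match st with
        | (seen, x, y) =>
          let (x, y) : Int × Int :=
            if d == '>' then (x + 1, y)
            else if d == '<' then (x - 1, y)
            else if d == '^' then (x, y + 1)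
            else if d == 'v' then (x, y - 1)
            else (x, y)
          (PySem.Set.add seen (x, y), x, y))
      (s, x, y)).1 = PySem.Set.update s (pvWalkPos path (x, y)) := by
  induction path generalizing s x y with
  | nil => simp [pvWalkPos, PySem.Set.update_nil]
  | cons c rest ih =>
    rw [List.foldl_cons]
    show (rest.foldl _ (PySem.Set.add s (pvStep c (x, y)), (pvStep c (x, y)).1, (pvStep c (x, y)).2)).1 = _
    rw [ih, pvWalkPos, PySem.Set.update_cons]

theorem pv_walk_update (path : List Char) (s : PySem.Set (Int × Int)) :
    pvWalk path s = PySem.Set.update s (pvWalkPos path (0, 0)) := by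
  exact pv_walk_aux path s 0 0

theorem pv_filterMap_evens {α : Type} (n : Nat) (cs : List α) (h : cs.length ≤ 2 * n) :
    List.filterMap (fun k => cs[2 * k]?) (List.range n) = pvEvens cs := by
  induction n generalizing cs with
  | zero =>
    have : cs = [] := by cases cs <;> simp_all
    simp [this, pvEvens]
  | succ n ih =>
    rw [List.range_succ_eq_map, List.filterMap_cons, List.filterMap_map]
    match cs with
    | [] => simp [pvEvens]
    | [a] =>
      simp only [Nat.mul_zero, List.getElem?_cons_zero]
      have : ∀ k : Nat, ([a] : List α)[2 * (k + 1)]? = none := by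
        intro k; rw [List.getElem?_eq_none] <;> simp <;> omega
      simp [Function.comp_def, this, pvEvens]
    | a :: b :: l =>
      simp only [Nat.mul_zero, List.getElem?_cons_zero]
      have h2 : ∀ k : Nat, (a :: b :: l)[2 * (k + 1)]? = l[2 * k]? := by
        intro k
        have : 2 * (k + 1) = 2 * k + 1 + 1 := by omega
        rw [this, List.getElem?_cons_succ, List.getElem?_cons_succ]
      simp only [Function.comp_def, h2]
      rw [ih l (by simp at h; omega)]
      rfl

theorem pv_slice_even {α : Type} (cs : List α) :
    PySem.List.slice? cs (some 0) none 2 = some (pvEvens cs) := by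
  simp only [PySem.List.slice?, PySem.List.sliceIndices]
  norm_num
  have hfe : (fun x : Nat => cs[(2 * (x : Int)).toNat]?) = fun x : Nat => cs[2 * x]? := by
    funext k
    have h2 : ((2 : Int) * (k : Int)).toNat = 2 * k := by omega
    rw [h2]
  rw [hfe]
  by_cases hl : 0 < cs.length
  · rw [if_pos hl]
    have hn : (((cs.length : Int) + 2 - 1) / 2).toNat = (cs.length + 1) / 2 := by omega
    have hb : cs.length ≤ 2 * ((cs.length + 1) / 2) := by omega
    rw [hn, pv_filterMap_evens _ cs hb]
  · rw [if_neg hl]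
    have : cs = [] := by cases cs <;> simp_all
    simp [this, pvEvens]

theorem pv_slice_odd {α : Type} (cs : List α) :
    PySem.List.slice? cs (some 1) none 2 = some (pvEvens cs.tail) := by
  simp only [PySem.List.slice?, PySem.List.sliceIndices]
  norm_num
  match cs with
  | [] => simp [pvEvens]
  | c :: l =>
    have hmin : min 1 ((c :: l).length : Int) = 1 := by
      simp only [List.length_cons]; omega
    rw [hmin]
    have hfe : (fun x : Nat => (c :: l)[(1 + 2 * (x : Int)).toNat]?) = fun x : Nat => l[2 * x]? := by
      funext k
      have h2 : ((1 : Int) + 2 * (k : Int)).toNat = 2 * k + 1 := by omega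
      rw [h2, List.getElem?_cons_succ]
    rw [hfe]
    by_cases hl : 1 < (c :: l).length
    · rw [if_pos hl]
      have hn : ((((c :: l).length : Int) - 1 + 2 - 1) / 2).toNat = (l.length + 1) / 2 := by
        simp only [List.length_cons]; push_cast; omega
      have hb : l.length ≤ 2 * ((l.length + 1) / 2) := by omega
      rw [hn, pv_filterMap_evens _ l hb, List.tail_cons]
    · rw [if_neg hl]
      have hl0 : l = [] := by
        simp only [List.length_cons] at hl
        cases l
        · rfl
        · exfalso; apply hl; simp
      simp [hl0, pvEvens]

theorem pv_digitChar_inj (m n : Nat) (hm : m < 10) (hn : n < 10)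
    (h : m.digitChar = n.digitChar) : m = n := by
  interval_cases m <;> interval_cases n <;> simp_all [Nat.digitChar]

theorem pv_toDigits_inj (m n : Nat) (h : Nat.toDigits 10 m = Nat.toDigits 10 n) : m = n := by
  induction m using Nat.strong_induction_on generalizing n with
  | _ m ih =>
    rw [Nat.toDigits_eq_if (by norm_num)] at h
    rw [Nat.toDigits_eq_if (b := 10) (n := n) (by norm_num)] at h
    split_ifs at h with h1 h2 h2
    · exact pv_digitChar_inj m n h1 h2 (List.cons.inj h).1
    · exfalso
      have hlen := congrArg List.length h
      have hpos : 0 < (Nat.toDigits 10 (n / 10)).length := Nat.length_toDigits_pos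
      simp only [List.length_cons, List.length_append, List.length_nil] at hlen
      omega
    · exfalso
      have hlen := congrArg List.length h
      have hpos : 0 < (Nat.toDigits 10 (m / 10)).length := Nat.length_toDigits_pos
      simp only [List.length_cons, List.length_append, List.length_nil] at hlen
      omega
    · have hinj := List.append_inj' h (by rfl)
      have hdiv : m / 10 = n / 10 :=
        ih (m / 10) (Nat.div_lt_self (by omega) (by norm_num)) (n / 10) hinj.1
      have hmod : m % 10 = n % 10 :=
        pv_digitChar_inj _ _ (Nat.mod_lt _ (by norm_num)) (Nat.mod_lt _ (by norm_num))
          (List.cons.inj hinj.2).1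
      omega

theorem pv_comma_not_mem_toChars (n : Int) : ',' ∉ PySem.Int.toChars n := by
  have hdig : ∀ m : Nat, ',' ∉ Nat.toDigits 10 m := by
    intro m hc
    have := Nat.isDigit_of_mem_toDigits (by norm_num) (by norm_num) hc
    simp [Char.isDigit] at this
  simp only [PySem.Int.toChars]
  split_ifs
  · intro hc
    rcases List.mem_cons.mp hc with h | h
    · exact absurd h (by decide)
    · exact hdig _ h
  · exact hdig _

theorem pv_head_digit (m : Nat) : '-' ∉ Nat.toDigits 10 m := by
  intro hc
  have := Nat.isDigit_of_mem_toDigits (by norm_num) (by norm_num) hc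
  simp [Char.isDigit] at this

theorem pv_toChars_inj (m n : Int) (h : PySem.Int.toChars m = PySem.Int.toChars n) : m = n := by
  simp only [PySem.Int.toChars] at h
  split_ifs at h with h1 h2 h2
  · have habs : m.natAbs = n.natAbs := pv_toDigits_inj _ _ (List.cons.inj h).2
    omega
  · exfalso
    apply pv_head_digit n.toNat
    rw [← h]
    exact List.mem_cons_self
  · exfalso
    apply pv_head_digit m.toNat
    rw [h]
    exact List.mem_cons_self
  · have habs : m.toNat = n.toNat := pv_toDigits_inj _ _ h
    omega

theorem pv_split_comma (a₁ b₁ a₂ b₂ : List Char) (h₁ : ',' ∉ a₁) (h₂ : ',' ∉ a₂)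
    (h : a₁ ++ ',' :: b₁ = a₂ ++ ',' :: b₂) : a₁ = a₂ ∧ b₁ = b₂ := by
  induction a₁ generalizing a₂ with
  | nil =>
    cases a₂ with
    | nil => simpa using h
    | cons c a₂' =>
      exfalso
      have := (List.cons.inj h).1
      exact h₂ (this ▸ List.mem_cons_self)
  | cons a a₁' ih =>
    cases a₂ with
    | nil =>
      exfalso
      have := (List.cons.inj h).1
      exact h₁ (this ▸ List.mem_cons_self)
    | cons c a₂' =>
      obtain ⟨hh, ht⟩ := List.cons.inj h
      have := ih a₂' (fun hm => h₁ (List.mem_cons_of_mem _ hm))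
        (fun hm => h₂ (List.mem_cons_of_mem _ hm)) ht
      exact ⟨by rw [hh, this.1], this.2⟩

theorem pv_key_inj : Function.Injective pvKey := by
  intro p q h
  have hl : (pvKey p).toList = (pvKey q).toList := by rw [h]
  simp only [pvKey, String.toList_append, PySem.Int.toList_toStr] at hl
  rw [List.append_assoc, List.append_assoc] at hl
  have hcomma : ("," : String).toList = [','] := rfl
  rw [hcomma] at hl
  simp only [List.singleton_append] at hl
  obtain ⟨h1, h2⟩ := pv_split_comma _ _ _ _ (pv_comma_not_mem_toChars _) (pv_comma_not_mem_toChars _) hl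
  exact Prod.ext (pv_toChars_inj _ _ h1) (pv_toChars_inj _ _ h2)

theorem pv_ofList_length_map {α β : Type} [BEq α] [LawfulBEq α] [BEq β] [LawfulBEq β]
    [DecidableEq α] [DecidableEq β] (f : α → β) (hf : Function.Injective f) (l : List α) :
    (PySem.Set.ofList (l.map f)).length = (PySem.Set.ofList l).length := by
  induction l using List.reverseRecOn with
  | nil => rfl
  | append_singleton l x ih =>
    rw [List.map_append, List.map_singleton, PySem.Set.ofList_append_singleton,
      PySem.Set.ofList_append_singleton, PySem.Set.add_eq_ite, PySem.Set.add_eq_ite]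
    by_cases hx : x ∈ PySem.Set.ofList l
    · have hfx : f x ∈ PySem.Set.ofList (l.map f) := by
        rw [PySem.Set.mem_ofList] at hx ⊢
        exact List.mem_map_of_mem hx
      rw [if_pos hx, if_pos hfx, ih]
    · have hfx : f x ∉ PySem.Set.ofList (l.map f) := by
        rw [PySem.Set.mem_ofList] at hx ⊢
        intro hc
        obtain ⟨y, hy, hyx⟩ := List.mem_map.mp hc
        exact hx (hf hyx ▸ hy)
      rw [if_neg hx, if_neg hfx]
      simp [ih]

theorem pv_ofList_length_perm {α : Type} [BEq α] [LawfulBEq α] [DecidableEq α] {l l' : List α}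
    (h : l.Perm l') : (PySem.Set.ofList l).length = (PySem.Set.ofList l').length := by
  refine List.Perm.length_eq ?_
  rw [List.perm_ext_iff_of_nodup (PySem.Set.nodup_ofList l) (PySem.Set.nodup_ofList l')]
  intro a
  rw [PySem.Set.mem_ofList, PySem.Set.mem_ofList]
  exact ⟨fun ha => h.mem_iff.mp ha, fun ha => h.mem_iff.mpr ha⟩


-- ===== VERDICT (by name: the statement is the Claim_ definition above) =====
theorem result_of_delivery_robo_and_santa_spec : Claim_equal_result_of_delivery_robo_and_santa := by
  intro route _
  unfold Spec_result_of_delivery_robo_and_santa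
  rw [pv_dictA]
  simp only [result_of_delivery_robo_and_santa_alt]
  rw [pv_slice_even, pv_slice_odd]
  simp only [Option.getD_some]
  rw [pv_walk_update, pv_walk_update]
  refine Prod.ext ?_ ?_
  · show ((PySem.Dict.counter ("0,0" :: (pvAVisits route.toList (0, 0) (0, 0)).map pvKey)).size : Int) = _
    rw [pv_size_counter]
    have hm : (("0,0" : String) :: (pvAVisits route.toList (0, 0) (0, 0)).map pvKey)
        = (((0, 0) :: pvAVisits route.toList (0, 0) (0, 0)).map pvKey) := by
      rw [List.map_cons]
      congr 1
    rw [hm, show ((PySem.Set.ofList (((0, 0) :: pvAVisits route.toList (0, 0) (0, 0)).map pvKey)).length)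
        = (PySem.Set.ofList ((0, 0) :: pvAVisits route.toList (0, 0) (0, 0))).length
      from pv_ofList_length_map pvKey pv_key_inj _]
    have hupd : (((PySem.Set.ofList [((0 : Int), (0 : Int))]).update
          (pvWalkPos (pvEvens route.toList) (0, 0))).update
          (pvWalkPos (pvEvens route.toList.tail) (0, 0)))
        = PySem.Set.ofList ((([((0 : Int), (0 : Int))]
            ++ pvWalkPos (pvEvens route.toList) (0, 0))
            ++ pvWalkPos (pvEvens route.toList.tail) (0, 0))) := by
      rw [PySem.Set.ofList_append, PySem.Set.ofList_append]
    show _ = PySem.Set.len _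
    rw [hupd]
    simp only [PySem.Set.len]
    congr 1
    apply pv_ofList_length_perm
    simp only [List.cons_append, List.nil_append]
    exact (pv_perm route.toList (0, 0) (0, 0)).cons ((0 : Int), (0 : Int))
  · show count_delivered_presents _ = _
    rw [pv_presents]
    simp only [List.length_cons, List.length_map, pv_len_aVisits, PySem.Str.len_eq]
    push_cast
    ring
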